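-- pv_equiv track=rewrite | github.com/sharronesofer/visual_dm | backend/scripts/tools/fix_type_checking_blocks.py | fix_type_checking_block
-- ===== SOURCE A (Python) =====
-- def fix_type_checking_block(content: str) -> str:
--     """Fix TYPE_CHECKING import blocks with proper indentation."""
--     lines = content.split('\n')
--     fixed_lines = []
--     in_type_checking = False
--     type_checking_indent = 0
--
--     for i, line in enumerate(lines):
--         # Detect TYPE_CHECKING block start
--         if 'if TYPE_CHECKING:' in line:
--             in_type_checking = True
--             type_checking_indent = len(line) - len(line.lstrip())
--             fixed_lines.append(line)
--             continue
--
--         # Handle lines inside TYPE_CHECKING block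
--         if in_type_checking:
--             # Empty lines are preserved
--             if line.strip() == '':
--                 fixed_lines.append(line)
--                 continue
--
--             current_indent = len(line) - len(line.lstrip())
--
--             # Check if this line should be part of the TYPE_CHECKING block
--             if (line.strip().startswith('from ') or
--                 line.strip().startswith('import ') or
--                 line.strip().startswith('#') or
--                 line.strip().startswith(')')):
--
--                 # This line should be indented under TYPE_CHECKING
--                 if current_indent <= type_checking_indent:
--                     proper_indent = ' ' * (type_checking_indent + 4)
--                     fixed_line = proper_indent + line.lstrip()
--                     fixed_lines.append(fixed_line)
--                 else:
--                     fixed_lines.append(line)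
--             else:
--                 # We've reached a line that's not part of TYPE_CHECKING
--                 in_type_checking = False
--                 fixed_lines.append(line)
--         else:
--             fixed_lines.append(line)
--
--     return '\n'.join(fixed_lines)
-- ===== SOURCE B (Python) =====
-- def fix_type_checking_block(content: str) -> str:
--     """Fix TYPE_CHECKING import blocks: two staged passes.
--
--     Pass 1 records, before each line, the index of the most recent
--     'if TYPE_CHECKING:' marker line and of the most recent block-breaking
--     line (non-empty, not a marker, not from/import/#/')').  Pass 2 rewrites
--     each line independently from those two indices: a line is governed by a
--     marker iff its nearest preceding marker is more recent than the nearest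
--     preceding breaking line.
--     """
--     lines = content.split('\n')
--
--     def is_marker(l):
--         return 'if TYPE_CHECKING:' in l
--
--     def is_importish(l):
--         return l.strip().startswith(('from ', 'import ', '#', ')'))
--
--     # pass 1: prefix indices
--     pre = []
--     lm = lb = -1
--     for i, l in enumerate(lines):
--         pre.append((lm, lb))
--         if is_marker(l):
--             lm = i
--         elif l.strip() != '' and not is_importish(l):
--             lb = i
--
--     # pass 2: per-line rewrite
--     out = []
--     for l, (m, b) in zip(lines, pre):
--         if not is_marker(l) and m > b and l.strip() != '' and is_importish(l):
--             ind = len(lines[m]) - len(lines[m].lstrip())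
--             if len(l) - len(l.lstrip()) <= ind:
--                 l = ' ' * (ind + 4) + l.lstrip()
--         out.append(l)
--     return '\n'.join(out)
-- ===== Notes on version B (the rewrite author's own statement) =====
-- stated objective: alternative
-- what changed: Replaces A's stateful single pass (a boolean in-block flag and indent threaded through one loop that emits as it scans) by two staged passes: pass 1 records for every line the index of the nearest preceding marker line and of the nearest preceding block-breaking line, and pass 2 rewrites each line independently from those two indices (a line is governed iff its nearest marker is more recent than its nearest breaker).
import Mathlib
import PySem

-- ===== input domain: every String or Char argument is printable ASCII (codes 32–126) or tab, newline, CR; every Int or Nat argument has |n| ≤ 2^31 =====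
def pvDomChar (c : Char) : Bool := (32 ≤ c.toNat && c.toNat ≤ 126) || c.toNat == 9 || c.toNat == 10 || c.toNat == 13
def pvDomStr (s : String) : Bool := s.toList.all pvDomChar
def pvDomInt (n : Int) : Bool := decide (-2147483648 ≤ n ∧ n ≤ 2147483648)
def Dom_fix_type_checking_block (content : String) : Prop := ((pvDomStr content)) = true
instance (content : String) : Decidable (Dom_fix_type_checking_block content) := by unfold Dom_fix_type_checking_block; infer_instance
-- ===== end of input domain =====

-- B replaces A's stateful single emitting pass by two staged passes (prefix indices, then an independent per-line rewrite); objective: alternative decomposition, same cost.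

-- shared per-line tests (identical expressions in both Pythons)
def pvMarker : List Char := "if TYPE_CHECKING:".toList
def pvIndentOf (l : List Char) : Nat := l.length - (PySem.Chars.lstrip l).length
def pvImportish (l : List Char) : Bool :=
  PySem.Chars.startswith (PySem.Chars.strip l) "from ".toList ||
  PySem.Chars.startswith (PySem.Chars.strip l) "import ".toList ||
  PySem.Chars.startswith (PySem.Chars.strip l) "#".toList ||
  PySem.Chars.startswith (PySem.Chars.strip l) ")".toList

-- ===== PORT A =====
-- A's single pass: foldl over the lines carrying (fixed_lines, in_type_checking, type_checking_indent)
def pvStepA (st : List (List Char) × Bool × Nat) (line : List Char) : List (List Char) × Bool × Nat :=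
  let (acc, inTC, ind) := st
  if PySem.Chars.isIn pvMarker line then
    (acc ++ [line], true, pvIndentOf line)
  else if inTC then
    if PySem.Chars.strip line = [] then (acc ++ [line], inTC, ind)
    else if pvImportish line then
      if pvIndentOf line ≤ ind then
        (acc ++ [List.replicate (ind + 4) ' ' ++ PySem.Chars.lstrip line], inTC, ind)
      else (acc ++ [line], inTC, ind)
    else (acc ++ [line], false, ind)
  else (acc ++ [line], inTC, ind)

def fix_type_checking_block (content : String) : String :=
  let lines := (PySem.Chars.split? content.toList "\n".toList).getD []
  let st := lines.foldl pvStepA ([], false, 0)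
  String.ofList (PySem.Chars.join ['\n'] st.1)

-- ===== PORT B =====
-- pass 1 step: before each line record (last-marker index, last-breaker index), then update them
def pvStepPre (st : List (Int × Int) × Int × Int) (p : Int × List Char) : List (Int × Int) × Int × Int :=
  let acc := st.1 ++ [(st.2.1, st.2.2)]
  if PySem.Chars.isIn pvMarker p.2 then (acc, p.1, st.2.2)
  else if PySem.Chars.strip p.2 ≠ [] ∧ pvImportish p.2 = false then (acc, st.2.1, p.1)
  else (acc, st.2.1, st.2.2)

-- pass 2: rewrite one line from its two prefix indices (lines[m] is only read when m > b ≥ -1, so m is a valid index)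
def pvRender (lines : List (List Char)) (p : List Char × (Int × Int)) : List Char :=
  if ¬ PySem.Chars.isIn pvMarker p.1 ∧ p.2.2 < p.2.1 ∧ PySem.Chars.strip p.1 ≠ [] ∧ pvImportish p.1 = true then
    let ml := (PySem.List.pyGet? lines p.2.1).getD []
    if pvIndentOf p.1 ≤ pvIndentOf ml then List.replicate (pvIndentOf ml + 4) ' ' ++ PySem.Chars.lstrip p.1
    else p.1
  else p.1

def fix_type_checking_block_alt (content : String) : String :=
  let lines := (PySem.Chars.split? content.toList "\n".toList).getD []
  let pre := ((PySem.List.enumerate lines 0).foldl pvStepPre ([], -1, -1)).1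
  String.ofList (PySem.Chars.join ['\n'] ((List.zip lines pre).map (pvRender lines)))

-- ===== PRECONDITION & SPEC =====
def Spec_fix_type_checking_block (content : String) (out : String) : Prop := out = fix_type_checking_block_alt content
instance (content : String) (out : String) : Decidable (Spec_fix_type_checking_block content out) := by unfold Spec_fix_type_checking_block; infer_instance

-- ===== CLAIM =====
def Claim_equal_fix_type_checking_block : Prop := ∀ (content : String), Dom_fix_type_checking_block content → Spec_fix_type_checking_block content (fix_type_checking_block content)

-- ===== LEMMAS AND PROOFS =====

-- the pair stream pass 1 produces, written as a structural scan (proof helper)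
def pvScan : Nat → Int → Int → List (List Char) → List (Int × Int)
  | _, _, _, [] => []
  | i, lm, lb, l :: ls =>
    (lm, lb) :: (if PySem.Chars.isIn pvMarker l then pvScan (i+1) (i : Int) lb ls
                 else if PySem.Chars.strip l ≠ [] ∧ pvImportish l = false then pvScan (i+1) lm (i : Int) ls
                 else pvScan (i+1) lm lb ls)

theorem pvPre_eq_scan (ls : List (List Char)) :
    ∀ (i : Nat) (lm lb : Int) (acc : List (Int × Int)),
      ((PySem.List.enumerate ls (i : Int)).foldl pvStepPre (acc, lm, lb)).1
        = acc ++ pvScan i lm lb ls := by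
  induction ls with
  | nil => intro i lm lb acc; simp [pvScan, PySem.List.enumerate_nil]
  | cons l ls ih =>
    intro i lm lb acc
    rw [PySem.List.enumerate_cons]
    have hc : (i : Int) + 1 = ((i + 1 : Nat) : Int) := by push_cast; ring
    simp only [List.foldl_cons, pvStepPre, pvScan, hc]
    split_ifs with h1 h2
    · simpa using ih (i+1) i lb (acc ++ [(lm, lb)])
    · simpa using ih (i+1) lm i (acc ++ [(lm, lb)])
    · simpa using ih (i+1) lm lb (acc ++ [(lm, lb)])

-- main invariant: A's fold from a state compatible with the prefix indices produces B's rendered lines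
theorem pvFold_eq_render (lines : List (List Char)) :
    ∀ (ls : List (List Char)) (i : Nat) (lm lb : Int) (inTC : Bool) (ind : Nat)
      (acc : List (List Char)),
      lines.drop i = ls →
      lm < (i : Int) → lb < (i : Int) →
      inTC = decide (lb < lm) →
      (inTC = true → pvIndentOf ((PySem.List.pyGet? lines lm).getD []) = ind) →
      (ls.foldl pvStepA (acc, inTC, ind)).1
        = acc ++ (List.zip ls (pvScan i lm lb ls)).map (pvRender lines) := by
  intro ls
  induction ls with
  | nil => intro i lm lb inTC ind acc _ _ _ _ _; simp [pvScan]
  | cons l ls ih =>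
    intro i lm lb inTC ind acc hdrop hlm hlb hm hi
    have hdrop' : lines.drop (i + 1) = ls := by
      have := congrArg (List.drop 1) hdrop
      simpa [List.drop_drop, Nat.add_comm] using this
    have hget : PySem.List.pyGet? lines (i : Int) = some l := by
      rw [PySem.List.pyGet?_natCast]
      rw [← List.head?_drop, hdrop]; rfl
    simp only [List.foldl_cons, pvStepA, pvScan, List.zip_cons_cons, List.map_cons]
    by_cases hmk : PySem.Chars.isIn pvMarker l
    · -- marker line: restart the block
      have hr : pvRender lines (l, (lm, lb)) = l := by simp [pvRender, hmk]
      have hI := ih (i+1) i lb true (pvIndentOf l) (acc ++ [l]) hdrop'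
        (by push_cast; omega) (by push_cast; omega)
        (by rw [decide_eq_true_iff.mpr]; omega) (by intro _; rw [hget]; rfl)
      simp [hmk, hr, hI]
    · by_cases htc : inTC = true
      · -- inside a block: lb < lm
        have hlt : lb < lm := by
          have := hm; rw [htc] at this; exact of_decide_eq_true this.symm
        subst htc
        by_cases hstrip : PySem.Chars.strip l = []
        · have hr : pvRender lines (l, (lm, lb)) = l := by simp [pvRender, hstrip]
          have hI := ih (i+1) lm lb true ind (acc ++ [l]) hdrop' (by omega) (by omega)
            (by rw [decide_eq_true_iff.mpr hlt]) hi
          simp [hmk, hstrip, hr, hI]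
        · by_cases himp : pvImportish l = true
          · -- import-ish line inside the block
            have hml : pvIndentOf ((PySem.List.pyGet? lines lm).getD []) = ind := hi rfl
            have hr : pvRender lines (l, (lm, lb)) =
                (if pvIndentOf l ≤ ind then List.replicate (ind + 4) ' ' ++ PySem.Chars.lstrip l else l) := by
              simp [pvRender, hmk, hlt, hstrip, himp, hml]
            by_cases hind : pvIndentOf l ≤ ind
            · have hI := ih (i+1) lm lb true ind
                (acc ++ [List.replicate (ind+4) ' ' ++ PySem.Chars.lstrip l]) hdrop'
                (by omega) (by omega) (by rw [decide_eq_true_iff.mpr hlt]) hi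
              simp [hmk, hstrip, himp, hind, hr, hI]
            · have hI := ih (i+1) lm lb true ind (acc ++ [l]) hdrop' (by omega) (by omega)
                (by rw [decide_eq_true_iff.mpr hlt]) hi
              simp [hmk, hstrip, himp, hind, hr, hI]
          · -- block-breaking line
            have himp' : pvImportish l = false := by simpa using himp
            have hr : pvRender lines (l, (lm, lb)) = l := by simp [pvRender, himp']
            have hI := ih (i+1) lm (i:Int) false ind (acc ++ [l]) hdrop' (by omega)
              (by push_cast; omega)
              (by rw [eq_comm, decide_eq_false_iff_not]; omega) (by intro h; cases h)
            simp [hmk, hstrip, himp', hr, hI]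
      · -- outside any block: lm ≤ lb
        have htcf : inTC = false := by cases inTC <;> simp_all
        have hle : lm ≤ lb := by
          have := hm; rw [htcf] at this
          have := of_decide_eq_false this.symm; omega
        subst htcf
        have hr : pvRender lines (l, (lm, lb)) = l := by
          by_cases hg : ¬ PySem.Chars.isIn pvMarker l ∧ lb < lm ∧ PySem.Chars.strip l ≠ [] ∧ pvImportish l = true
          · exact absurd hg.2.1 (by omega)
          · simp only [pvRender]; rw [if_neg hg]
        by_cases hbr : PySem.Chars.strip l ≠ [] ∧ pvImportish l = false
        · have hI := ih (i+1) lm (i:Int) false ind (acc ++ [l]) hdrop' (by omega)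
            (by push_cast; omega)
            (by rw [eq_comm, decide_eq_false_iff_not]; omega) (by intro h; cases h)
          simp [hmk, hbr.1, hbr.2, hr, hI]
        · have hI := ih (i+1) lm lb false ind (acc ++ [l]) hdrop' (by omega) (by omega)
            (by rw [eq_comm, decide_eq_false_iff_not]; omega) (by intro h; cases h)
          have hsc : (if PySem.Chars.strip l ≠ [] ∧ pvImportish l = false then pvScan (i+1) lm (i:Int) ls
                      else pvScan (i+1) lm lb ls) = pvScan (i+1) lm lb ls := by
            simp only [if_neg hbr]
          simp [hmk, hr, hsc, hI]

-- ===== VERDICT (by name: the statement is the Claim_ definition above) =====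
theorem fix_type_checking_block_spec : Claim_equal_fix_type_checking_block := by
  intro content _
  show _ = _
  unfold fix_type_checking_block fix_type_checking_block_alt
  have hpre : ((PySem.List.enumerate ((PySem.Chars.split? content.toList "\n".toList).getD []) 0).foldl pvStepPre ([], -1, -1)).1
      = pvScan 0 (-1) (-1) ((PySem.Chars.split? content.toList "\n".toList).getD []) := by
    simpa using pvPre_eq_scan ((PySem.Chars.split? content.toList "\n".toList).getD []) 0 (-1) (-1) []
  have hmain := pvFold_eq_render ((PySem.Chars.split? content.toList "\n".toList).getD [])
      ((PySem.Chars.split? content.toList "\n".toList).getD []) 0 (-1) (-1) false 0 []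
      (by simp) (by omega) (by omega) (by simp) (by intro h; cases h)
  simp only [List.nil_append] at hmain
  show String.ofList (PySem.Chars.join ['\n'] (((PySem.Chars.split? content.toList "\n".toList).getD []).foldl pvStepA ([], false, 0)).1)
      = String.ofList (PySem.Chars.join ['\n'] ((List.zip ((PySem.Chars.split? content.toList "\n".toList).getD [])
          ((PySem.List.enumerate ((PySem.Chars.split? content.toList "\n".toList).getD []) 0).foldl pvStepPre ([], -1, -1)).1).map (pvRender ((PySem.Chars.split? content.toList "\n".toList).getD []))))
  rw [hpre, hmain]
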